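-- pv_equiv track=rewrite | github.com/shreyansh424singh/COL215-SW-KMap | Assignment 5 (SW3)/a3_old.py | get_literals
-- ===== SOURCE A (Python) =====
-- def get_literals(term):
--     if len(term) == 0:
--         return []
--     ls = []
--     prev = term[0]
--     for i in term[1:]:
--         if i == '\'':
--             prev = str(prev) + '\''
--         else:
--             ls.append(prev)
--             prev = i
--
--     ls.append(prev)
--     return ls
-- ===== SOURCE B (Python) =====
-- def get_literals(term):
--     res = []
--     i, n = 0, len(term)
--     while i < n:
--         j = i + 1
--         while j < n and term[j] == "'":
--             j += 1
--         res.append(term[i:j])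
--         i = j
--     return res
-- ===== Notes on version B (the rewrite author's own statement) =====
-- stated objective: idiomatic
-- what changed: Replaces the prev-accumulator/flush scan with direct run grouping: for each position, scan the trailing run of apostrophes and slice the token out of the string in one step, with no prev state or final flush.
import Mathlib
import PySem

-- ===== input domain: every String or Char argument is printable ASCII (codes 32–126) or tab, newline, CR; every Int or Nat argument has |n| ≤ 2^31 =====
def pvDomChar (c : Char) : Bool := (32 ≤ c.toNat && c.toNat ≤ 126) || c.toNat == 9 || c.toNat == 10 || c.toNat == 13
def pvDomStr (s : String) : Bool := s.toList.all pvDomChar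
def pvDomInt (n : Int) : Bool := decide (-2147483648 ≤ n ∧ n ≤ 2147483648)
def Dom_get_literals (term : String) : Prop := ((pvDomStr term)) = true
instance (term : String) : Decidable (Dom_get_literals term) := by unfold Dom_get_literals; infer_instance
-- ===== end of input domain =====

-- B replaces A's prev-accumulator scan with direct grouping of each character with its
-- run of trailing apostrophes (idiomatic; same cost).

-- ===== PORT A =====
-- A's loop over term[1:] with state (ls, prev); prev is kept as a List Char (Python str),
-- appended to ls (as a String) when a non-apostrophe character is reached.
def get_literals (term : String) : List String :=
  match term.toList with
  | [] => []
  | c :: rest =>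
    let st := rest.foldl (fun (st : List String × List Char) i =>
      if i = '\'' then (st.1, st.2 ++ ['\''])
      else (st.1 ++ [String.ofList st.2], [i])) ([], [c])
    st.1 ++ [String.ofList st.2]

-- ===== PORT B =====
-- B's outer while-loop: each step takes one character plus its run of trailing
-- apostrophes (the inner j-scan = takeWhile/dropWhile) and continues after the run.
def getLitsGo : List Char → List String
  | [] => []
  | c :: rest =>
    String.ofList (c :: rest.takeWhile (· = '\'')) :: getLitsGo (rest.dropWhile (· = '\''))
  termination_by l => l.length
  decreasing_by
    simp only [List.length_cons]
    exact Nat.lt_succ_of_le (List.length_dropWhile_le _ _)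

def get_literals_alt (term : String) : List String := getLitsGo term.toList

-- ===== PRECONDITION & SPEC =====
def Spec_get_literals (term : String) (out : List String) : Prop := out = get_literals_alt term
instance (term : String) (out : List String) : Decidable (Spec_get_literals term out) := by unfold Spec_get_literals; infer_instance

-- ===== CLAIM (what is proved, stated in full; the proofs are below) =====
def Claim_equal_get_literals : Prop := ∀ (term : String), Dom_get_literals term → Spec_get_literals term (get_literals term)

-- ===== LEMMAS AND PROOFS =====

-- A's fold starting from accumulator (ls, prev) produces ls, then prev extended by the
-- leading apostrophe run, then B's grouping of the remainder.
theorem getLits_fold_eq (rest : List Char) : ∀ (ls : List String) (prev : List Char),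
    (let st := rest.foldl (fun (st : List String × List Char) i =>
      if i = '\'' then (st.1, st.2 ++ ['\''])
      else (st.1 ++ [String.ofList st.2], [i])) (ls, prev)
     st.1 ++ [String.ofList st.2])
    = ls ++ (String.ofList (prev ++ rest.takeWhile (· = '\'')) :: getLitsGo (rest.dropWhile (· = '\''))) := by
  induction rest with
  | nil => intro ls prev; rw [getLitsGo.eq_def]; simp
  | cons c rs ih =>
    intro ls prev
    by_cases hc : c = '\''
    · subst hc
      simp only [List.foldl_cons, if_pos rfl, List.takeWhile_cons, List.dropWhile_cons,
        decide_true, if_true]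
      rw [ih ls (prev ++ ['\''])]
      simp
    · simp only [List.foldl_cons, if_neg hc, List.takeWhile_cons, List.dropWhile_cons,
        decide_eq_true_eq, if_neg hc]
      rw [ih (ls ++ [String.ofList prev]) [c]]
      conv_rhs => rw [getLitsGo.eq_def]
      simp

-- ===== VERDICT (by name: the statement is the Claim_ definition above) =====
theorem get_literals_spec : Claim_equal_get_literals := by
  intro term _
  unfold Spec_get_literals get_literals get_literals_alt
  cases h : term.toList with
  | nil => rw [getLitsGo.eq_def]
  | cons c rest =>
    simp only []
    rw [getLits_fold_eq rest [] [c]]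
    conv_rhs => rw [getLitsGo.eq_def]
    simp
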